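-- pv_equiv track=rewrite | github.com/BeamINDU/Lab04 | siamtemp_hvac_chatbot/agents/enhanced_conversation_memory_system.py | _track_entity_sources
-- ===== SOURCE A (Python) =====
-- from typing import Dict, List, Any, Optional, Tuple
--
-- def _track_entity_sources(current: Dict, inherited: Dict) -> Dict[str, str]:
--     """Track where each entity came from"""
--     sources = {}
--     for entity_type in set(list(current.keys()) + list(inherited.keys())):
--         if entity_type in current and current[entity_type]:
--             sources[entity_type] = 'current_query'
--         elif entity_type in inherited and inherited[entity_type]:
--             sources[entity_type] = 'inherited_context'
--     return sources
-- ===== SOURCE B (Python) =====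
-- def _track_entity_sources(current, inherited):
--     """Track where each entity came from"""
--     sources = {}
--     for k, v in current.items():
--         if v:
--             sources[k] = 'current_query'
--         elif inherited.get(k):
--             sources[k] = 'inherited_context'
--     for k, v in inherited.items():
--         if k not in current and v:
--             sources[k] = 'inherited_context'
--     return sources
-- ===== Notes on version B (the rewrite author's own statement) =====
-- stated objective: alternative
-- what changed: Drops A's union-of-keys set and its per-key membership/index lookups into current: B makes two staged passes directly over the items of each dict, labeling truthy current entries in pass one (falling back to inherited for falsy ones) and appending inherited-only truthy entries in pass two.
import Mathlib
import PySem

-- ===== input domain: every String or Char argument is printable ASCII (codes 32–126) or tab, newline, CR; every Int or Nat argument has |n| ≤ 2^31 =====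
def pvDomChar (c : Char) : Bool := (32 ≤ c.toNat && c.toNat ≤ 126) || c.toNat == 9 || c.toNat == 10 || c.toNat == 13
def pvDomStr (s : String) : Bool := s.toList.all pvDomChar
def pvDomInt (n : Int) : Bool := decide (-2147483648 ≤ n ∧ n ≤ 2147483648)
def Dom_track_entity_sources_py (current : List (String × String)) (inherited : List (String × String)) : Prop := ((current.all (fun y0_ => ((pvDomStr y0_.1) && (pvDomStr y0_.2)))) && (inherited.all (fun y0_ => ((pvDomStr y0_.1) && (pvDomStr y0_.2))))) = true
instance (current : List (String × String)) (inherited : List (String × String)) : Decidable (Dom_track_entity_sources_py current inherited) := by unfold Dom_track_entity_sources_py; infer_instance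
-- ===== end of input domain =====

-- B drops A's union-of-keys set: it makes two staged passes over the items of the two dicts
-- (label truthy current entries, then append inherited-only truthy entries) — alternative decomposition, same cost.


-- ===== PORT A =====
-- 'k in d and d[k]' (string truthiness: nonempty)
def pyTruthyA (d : PySem.Dict String String) (k : String) : Bool :=
  d.contains k && (d.getD k "" != "")

def track_entity_sources_py (current : List (String × String)) (inherited : List (String × String)) : List (String × String) :=
  let cur : PySem.Dict String String := PySem.Dict.mk current
  let inh : PySem.Dict String String := PySem.Dict.mk inherited
  let keys := PySem.Set.ofList (cur.keys ++ inh.keys)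
  (keys.foldl (fun sources k =>
      if pyTruthyA cur k then sources.insert k "current_query"
      else if pyTruthyA inh k then sources.insert k "inherited_context"
      else sources) PySem.Dict.empty).items

-- ===== PORT B =====
-- 'd.get(k)' truthiness: key present with a nonempty value
def pyGetTruthy (d : List (String × String)) (k : String) : Bool :=
  match d.find? (fun p => p.1 == k) with
  | some p => p.2 != ""
  | none => false

def track_entity_sources_py_alt (current : List (String × String)) (inherited : List (String × String)) : List (String × String) :=
  -- pass 1: for k, v in current.items()
  let pass1 : PySem.Dict String String := current.foldl (fun sources kv =>
      if kv.2 != "" then sources.insert kv.1 "current_query"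
      else if pyGetTruthy inherited kv.1 then sources.insert kv.1 "inherited_context"
      else sources) PySem.Dict.empty
  -- pass 2: for k, v in inherited.items(): if k not in current and v
  (inherited.foldl (fun sources kv =>
      if !(current.any (fun p => p.1 == kv.1)) && kv.2 != "" then sources.insert kv.1 "inherited_context"
      else sources) pass1).items

-- ===== PRECONDITION & SPEC =====
-- Pre_ excludes association lists with a duplicated key: they do not arise from a Python dict
-- (dict construction merges duplicates), so no behaviour of A on them is being claimed.
def Pre_track_entity_sources_py (current : List (String × String)) (inherited : List (String × String)) : Prop :=
  (current.map Prod.fst).Nodup ∧ (inherited.map Prod.fst).Nodup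
instance (current : List (String × String)) (inherited : List (String × String)) : Decidable (Pre_track_entity_sources_py current inherited) := by unfold Pre_track_entity_sources_py; infer_instance

def pvWitness_track_entity_sources_py : (List (String × String)) × (List (String × String)) :=
  ([("a", "x"), ("b", "")], [("b", "y"), ("c", "")])

def Spec_track_entity_sources_py (current : List (String × String)) (inherited : List (String × String)) (out : List (String × String)) : Prop := out = track_entity_sources_py_alt current inherited
instance (current : List (String × String)) (inherited : List (String × String)) (out : List (String × String)) : Decidable (Spec_track_entity_sources_py current inherited out) := by unfold Spec_track_entity_sources_py; infer_instance

-- ===== CLAIM (what is proved, stated in full; the proofs are below) =====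
def Claim_equal_track_entity_sources_py : Prop := ∀ (current : List (String × String)) (inherited : List (String × String)), Dom_track_entity_sources_py current inherited → Pre_track_entity_sources_py current inherited → Spec_track_entity_sources_py current inherited (track_entity_sources_py current inherited)

-- ===== LEMMAS AND PROOFS =====

theorem get?_mk_eq_find? (l : List (String × String)) (k : String) :
    (PySem.Dict.mk l).get? k = (l.find? (fun p => p.1 == k)).map Prod.snd := by
  induction l with
  | nil => rfl
  | cons a rest ih =>
      obtain ⟨x, v⟩ := a
      rw [PySem.Dict.get?_mk_cons, List.find?_cons]
      by_cases h : x = k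
      · simp [h]
      · have hx : (x == k) = false := by simp [h]
        simp [hx, ih]

theorem truthy_eq (l : List (String × String)) (k : String) :
    pyTruthyA (PySem.Dict.mk l) k = pyGetTruthy l k := by
  unfold pyTruthyA pyGetTruthy
  rw [PySem.Dict.contains_eq_isSome_get?, PySem.Dict.getD_eq_get?_getD, get?_mk_eq_find?]
  cases l.find? (fun p => p.1 == k) <;> simp

theorem gT_of_not_mem (l : List (String × String)) (k : String)
    (h : k ∉ l.map Prod.fst) : pyGetTruthy l k = false := by
  unfold pyGetTruthy
  have : l.find? (fun p => p.1 == k) = none := by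
    rw [List.find?_eq_none]
    intro p hp hbeq
    exact h (List.mem_map.mpr ⟨p, hp, by simpa using hbeq⟩)
  simp [this]

theorem find?_eq_of_mem_nodup (l : List (String × String)) (kv : String × String)
    (hnd : (l.map Prod.fst).Nodup) (hmem : kv ∈ l) : l.find? (fun p => p.1 == kv.1) = some kv := by
  induction l with
  | nil => cases hmem
  | cons a rest ih =>
      rw [List.map_cons, List.nodup_cons] at hnd
      rw [List.find?_cons]
      rcases List.mem_cons.mp hmem with h | hmem'
      · simp [h]
      · have hne : a.1 ≠ kv.1 := by
          intro he
          exact hnd.1 (he ▸ List.mem_map.mpr ⟨kv, hmem', rfl⟩)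
        have hb : (a.1 == kv.1) = false := by simpa using hne
        simp only [hb]
        exact ih hnd.2 hmem'

theorem gT_of_mem_nodup (l : List (String × String)) (kv : String × String)
    (hnd : (l.map Prod.fst).Nodup) (hmem : kv ∈ l) : pyGetTruthy l kv.1 = (kv.2 != "") := by
  unfold pyGetTruthy
  rw [find?_eq_of_mem_nodup l kv hnd hmem]

theorem any_key_eq_contains (l : List (String × String)) (k : String) :
    l.any (fun p => p.1 == k) = decide (k ∈ l.map Prod.fst) := by
  by_cases h : k ∈ l.map Prod.fst
  · obtain ⟨p, hp, he⟩ := List.mem_map.mp h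
    simp only [h, decide_true]
    exact List.any_eq_true.mpr ⟨p, hp, by simpa using he⟩
  · simp only [h, decide_false]
    rw [List.any_eq_false]
    intro p hp hbeq
    exact h (List.mem_map.mpr ⟨p, hp, by simpa using hbeq⟩)

theorem track_entity_sources_py_spec : Claim_equal_track_entity_sources_py := by
  unfold Claim_equal_track_entity_sources_py
  intro current inherited _ hpre
  obtain ⟨hndc, hndi⟩ := hpre
  unfold Spec_track_entity_sources_py track_entity_sources_py track_entity_sources_py_alt
  dsimp only
  -- notation
  set gc : String → Bool := fun k => pyGetTruthy current k with hgc
  set gi : String → Bool := fun k => pyGetTruthy inherited k with hgi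
  set p : String → Bool := fun k => gc k || gi k with hp
  set val : String → String := fun k => if gc k then "current_query" else "inherited_context" with hval
  -- ===== A side =====
  have hkeys : (PySem.Dict.mk current).keys ++ (PySem.Dict.mk inherited).keys
      = current.map Prod.fst ++ inherited.map Prod.fst := rfl
  rw [hkeys]
  set curKeys := current.map Prod.fst with hck
  set inhKeys := inherited.map Prod.fst with hik
  have hstep : (PySem.Set.ofList (curKeys ++ inhKeys)).foldl (fun sources k =>
      if pyTruthyA (PySem.Dict.mk current) k then sources.insert k "current_query"
      else if pyTruthyA (PySem.Dict.mk inherited) k then sources.insert k "inherited_context"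
      else sources) PySem.Dict.empty
      = (PySem.Set.ofList (curKeys ++ inhKeys)).foldl
          (fun sources k => if p k then sources.insert k (val k) else sources) PySem.Dict.empty := by
    apply PySem.List.foldl_congr_mem
    intro acc k _
    rw [truthy_eq, truthy_eq]
    by_cases h1 : pyGetTruthy current k = true <;> by_cases h2 : pyGetTruthy inherited k = true <;>
      simp [hp, hval, hgc, hgi, h1, h2]
  rw [hstep, PySem.List.foldl_if_eq_foldl_filter]
  have hsetform : PySem.Set.ofList (curKeys ++ inhKeys)
      = curKeys ++ inhKeys.filter (fun y => !(PySem.Set.contains curKeys y)) := by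
    rw [PySem.Set.ofList_append, PySem.Set.update_eq_append_filter,
        PySem.Set.ofList_eq_self_of_nodup _ hndc, PySem.Set.ofList_eq_self_of_nodup _ hndi]
  rw [hsetform]
  have hndA : (((curKeys ++ inhKeys.filter (fun y => !(PySem.Set.contains curKeys y))).filter p).map (fun x => x)).Nodup := by
    have hid : (fun x : String => x) = id := rfl
    rw [hid, List.map_id]
    apply List.Nodup.filter
    apply List.Nodup.append hndc (hndi.filter _)
    intro a ha hb
    have hcont := List.of_mem_filter hb
    have hnin : a ∉ curKeys := by simpa using hcont
    exact hnin ha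
  have hA := PySem.Dict.items_foldl_insert_fresh
      (l := (curKeys ++ inhKeys.filter (fun y => !(PySem.Set.contains curKeys y))).filter p)
      (k := fun x => x) (v := fun x => val x) (d := (PySem.Dict.empty : PySem.Dict String String))
      (by intro a _; exact PySem.Dict.contains_empty a) hndA
  rw [hA]
  -- ===== B side =====
  set q1 : String × String → Bool := fun kv => (kv.2 != "") || gi kv.1 with hq1
  set tag : String × String → String := fun kv => if kv.2 != "" then "current_query" else "inherited_context" with htag
  have hstep1 : (fun (sources : PySem.Dict String String) (kv : String × String) =>
      if kv.2 != "" then sources.insert kv.1 "current_query"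
      else if pyGetTruthy inherited kv.1 then sources.insert kv.1 "inherited_context"
      else sources)
      = fun sources kv => if q1 kv then sources.insert kv.1 (tag kv) else sources := by
    funext s kv
    by_cases h1 : kv.2 = ""
    · by_cases h2 : pyGetTruthy inherited kv.1 = true <;> simp [hq1, htag, hgi, h1, h2]
    · simp [hq1, htag, hgi, h1]
  rw [hstep1, PySem.List.foldl_if_eq_foldl_filter]
  have hnd1 : ((current.filter q1).map Prod.fst).Nodup :=
    hndc.sublist (List.Sublist.map Prod.fst List.filter_sublist)
  have hB1 := PySem.Dict.items_foldl_insert_fresh (l := current.filter q1)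
      (k := Prod.fst) (v := tag) (d := (PySem.Dict.empty : PySem.Dict String String))
      (by intro a _; exact PySem.Dict.contains_empty a.1) hnd1
  set d1 := (current.filter q1).foldl (fun d a => d.insert a.1 (tag a)) PySem.Dict.empty with hd1
  set q2 : String × String → Bool := fun kv => !(current.any (fun p => p.1 = kv.1)) && (kv.2 != "") with hq2
  rw [PySem.List.foldl_if_eq_foldl_filter]
  have hd1keys : d1.keys = (current.filter q1).map Prod.fst := by
    show d1.items.map Prod.fst = _
    rw [hB1]; simp [PySem.Dict.empty]
  have hfresh2 : ∀ a ∈ inherited.filter (fun kv => !(current.any (fun p => p.1 == kv.1)) && (kv.2 != "")),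
      d1.contains a.1 = false := by
    intro a ha
    have hq := List.of_mem_filter ha
    rw [Bool.and_eq_true, any_key_eq_contains] at hq
    have hnotin : a.1 ∉ curKeys := by
      have := hq.1; simp only [Bool.not_eq_eq_eq_not, Bool.not_true, decide_eq_false_iff_not] at this
      exact this
    rw [PySem.Dict.contains_eq_decide_mem_keys, hd1keys, decide_eq_false_iff_not]
    intro hmem
    exact hnotin ((List.Sublist.map Prod.fst List.filter_sublist).mem hmem)
  have hnd2 : ((inherited.filter (fun kv => !(current.any (fun p => p.1 == kv.1)) && (kv.2 != ""))).map Prod.fst).Nodup :=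
    hndi.sublist (List.Sublist.map Prod.fst List.filter_sublist)
  have hB2 := PySem.Dict.items_foldl_insert_fresh
      (l := inherited.filter (fun kv => !(current.any (fun p => p.1 == kv.1)) && (kv.2 != "")))
      (k := Prod.fst) (v := fun _ => "inherited_context") (d := d1) hfresh2 hnd2
  rw [hB2, hB1]
  -- ===== both sides are now explicit lists; align them =====
  have hemp : (PySem.Dict.empty : PySem.Dict String String).items = [] := rfl
  rw [List.filter_append, List.map_append, hemp, List.nil_append, List.nil_append]
  congr 1
  · -- current-keys part
    rw [hck, List.filter_map]
    rw [List.map_map]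
    have hfeq : current.filter (p ∘ Prod.fst) = current.filter q1 := by
      apply List.filter_congr
      intro kv hkv
      have := gT_of_mem_nodup current kv hndc hkv
      simp only [Function.comp, hp, hq1, hgc, hgi, this]
    rw [hfeq]
    apply List.map_congr_left
    intro kv hkv
    have hkvc : kv ∈ current := List.mem_of_mem_filter hkv
    have := gT_of_mem_nodup current kv hndc hkvc
    simp only [Function.comp, hval, htag, hgc, this]
  · -- inherited-only part
    rw [hik, List.filter_map, List.filter_map, List.filter_filter, List.map_map]
    simp only [Function.comp]
    have hfeq : inherited.filter (fun a => p a.1 && !(PySem.Set.contains curKeys a.1))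
        = inherited.filter (fun kv => !(current.any (fun p => p.1 == kv.1)) && (kv.2 != "")) := by
      apply List.filter_congr
      intro kv hkv
      rw [any_key_eq_contains]
      simp only [PySem.Set.contains_eq_listContains]
      by_cases hmem : kv.1 ∈ curKeys
      · obtain ⟨⟨a, b⟩, hq, he⟩ := List.mem_map.mp hmem
        cases he
        simp [hmem]
        intro h
        exact absurd hq (h b)
      · have hgcf : gc kv.1 = false := by rw [hgc]; exact gT_of_not_mem current kv.1 hmem
        have hgieq : gi kv.1 = (kv.2 != "") := by rw [hgi]; exact gT_of_mem_nodup inherited kv hndi hkv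
        simp [hp, hgcf, hgieq, hmem, Bool.and_comm]
        intro _ x hx
        exact hmem (List.mem_map.mpr ⟨(kv.1, x), hx, rfl⟩)
    rw [hfeq]
    apply List.map_congr_left
    intro kv hkv
    have hq := List.of_mem_filter hkv
    rw [Bool.and_eq_true, any_key_eq_contains] at hq
    have hnotin : kv.1 ∉ curKeys := by
      have := hq.1
      simp only [Bool.not_eq_true', decide_eq_false_iff_not] at this
      exact this
    have hgcf : gc kv.1 = false := by rw [hgc]; exact gT_of_not_mem current kv.1 hnotin
    simp [Function.comp, hval, hgcf]
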